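-- pv_equiv track=rewrite | github.com/Checkmk/checkmk | cmk/base/legacy_checks/rstcli.py | parse_rstcli_volumes
-- ===== SOURCE A (Python) =====
-- def parse_rstcli_volumes(rows):
--     volumes = {}
--     current_volume = {}
--
--     for row in rows:
--         if row[0] == "Name":
--             current_volume = {}
--             volumes[row[1].strip()] = current_volume
--         else:
--             current_volume[row[0]] = row[1].strip()
--
--     return volumes
-- ===== SOURCE B (Python) =====
-- def parse_rstcli_volumes(rows):
--     n = len(rows)
--     # skip leading rows before the first "Name" row (they are discarded)
--     i = 0
--     while i < n and rows[i][0] != "Name":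
--         i += 1
--     volumes = {}
--     # split the remainder into segments, one per "Name" row
--     while i < n:
--         name = rows[i][1].strip()
--         j = i + 1
--         while j < n and rows[j][0] != "Name":
--             j += 1
--         volumes[name] = {r[0]: r[1].strip() for r in rows[i + 1 : j]}
--         i = j
--     return volumes
-- ===== Notes on version B (the rewrite author's own statement) =====
-- stated objective: alternative
-- what changed: Replaces A's stateful loop that mutates an aliased current_volume dict with an explicit segment decomposition: skip rows before the first 'Name' row, find each segment's boundaries by index scan, and build each volume's attribute dict with a comprehension over the segment slice.
import Mathlib
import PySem

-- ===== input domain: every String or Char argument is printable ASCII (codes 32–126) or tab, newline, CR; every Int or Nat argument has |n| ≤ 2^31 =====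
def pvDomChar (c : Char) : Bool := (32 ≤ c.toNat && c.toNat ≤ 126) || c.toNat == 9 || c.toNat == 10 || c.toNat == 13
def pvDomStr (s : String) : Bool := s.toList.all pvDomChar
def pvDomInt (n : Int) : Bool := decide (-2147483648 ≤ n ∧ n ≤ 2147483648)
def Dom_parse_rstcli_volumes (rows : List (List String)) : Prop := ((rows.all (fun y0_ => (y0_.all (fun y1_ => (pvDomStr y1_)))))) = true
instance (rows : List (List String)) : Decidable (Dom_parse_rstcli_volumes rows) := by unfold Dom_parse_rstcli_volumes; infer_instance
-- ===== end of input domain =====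

-- B replaces A's stateful loop (mutating an aliased current_volume dict) by an explicit
-- segment decomposition (skip to the first "Name" row, then split at "Name" boundaries);
-- objective: alternative decomposition, same O(n) cost. Return-value equivalence only (neither mutates its argument).

-- ===== PORT A =====
-- step function of A's loop: state = (volumes, key of the current volume (None before the first "Name" row));
-- current_volume is always the entry of volumes at that key, so the aliased mutation is a modify at it
def pvStepA (st : PySem.Dict String (PySem.Dict String String) × Option String)
    (row : List String) : PySem.Dict String (PySem.Dict String String) × Option String :=
  if PySem.List.pyGetD row 0 "" = "Name" then
    let name := PySem.Str.strip (PySem.List.pyGetD row 1 "")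
    (st.1.insert name PySem.Dict.empty, some name)
  else
    match st.2 with
    | none => st  -- current_volume is a fresh dict not stored in volumes: the write is invisible in the result
    | some k =>
        (st.1.modify k PySem.Dict.empty
          (fun d => d.insert (PySem.List.pyGetD row 0 "") (PySem.Str.strip (PySem.List.pyGetD row 1 ""))), st.2)

def parse_rstcli_volumes (rows : List (List String)) : List (String × List (String × String)) :=
  ((rows.foldl pvStepA (PySem.Dict.empty, none)).1).items.map (fun p => (p.1, p.2.items))

-- ===== PORT B =====
-- first while loop: skip leading rows before the first "Name" row
def pvDropPre : List (List String) → List (List String)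
  | [] => []
  | r :: rest => if PySem.List.pyGetD r 0 "" = "Name" then r :: rest else pvDropPre rest

-- inner while loop: split off the segment body (rows up to the next "Name" row)
def pvBodySpan : List (List String) → List (List String) × List (List String)
  | [] => ([], [])
  | r :: rest =>
    if PySem.List.pyGetD r 0 "" = "Name" then ([], r :: rest)
    else
      let p := pvBodySpan rest
      (r :: p.1, p.2)

theorem pvBodySpan_snd_length_le (rows : List (List String)) :
    (pvBodySpan rows).2.length ≤ rows.length := by
  induction rows with
  | nil => simp [pvBodySpan]
  | cons r rest ih =>
    simp only [pvBodySpan]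
    split
    · simp
    · simpa using Nat.le_succ_of_le ih

-- outer while loop: one (name, body) segment per "Name" row
def pvSegs : List (List String) → List (String × List (List String))
  | [] => []
  | r :: rest =>
    let p := pvBodySpan rest
    (PySem.Str.strip (PySem.List.pyGetD r 1 ""), p.1) :: pvSegs p.2
  termination_by rows => rows.length
  decreasing_by
    exact Nat.lt_succ_of_le (pvBodySpan_snd_length_le rest)

-- the dict comprehension over a segment body
def pvAttrDict (body : List (List String)) : PySem.Dict String String :=
  body.foldl
    (fun d r => d.insert (PySem.List.pyGetD r 0 "") (PySem.Str.strip (PySem.List.pyGetD r 1 "")))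
    PySem.Dict.empty

def parse_rstcli_volumes_alt (rows : List (List String)) : List (String × List (String × String)) :=
  ((pvSegs (pvDropPre rows)).foldl
      (fun vols s => vols.insert s.1 (pvAttrDict s.2)) PySem.Dict.empty).items.map
    (fun p => (p.1, p.2.items))

-- ===== PRECONDITION & SPEC =====
-- Python A raises IndexError on any row with fewer than two cells (it reads row[0] and row[1] on every row)
def Pre_parse_rstcli_volumes (rows : List (List String)) : Prop :=
  ∀ r ∈ rows, 2 ≤ r.length

instance (rows : List (List String)) : Decidable (Pre_parse_rstcli_volumes rows) := by
  unfold Pre_parse_rstcli_volumes; infer_instance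

def pvWitness_parse_rstcli_volumes : List (List String) :=
  [["Name", " md0 "], ["State", " OK"], ["Size", "100 "], ["Name", "md1"], ["State", "Degraded"]]

def Spec_parse_rstcli_volumes (rows : List (List String)) (out : List (String × List (String × String))) : Prop := out = parse_rstcli_volumes_alt rows
instance (rows : List (List String)) (out : List (String × List (String × String))) : Decidable (Spec_parse_rstcli_volumes rows out) := by unfold Spec_parse_rstcli_volumes; infer_instance

-- ===== CLAIM (what is proved, stated in full; the proofs are below) =====
def Claim_equal_parse_rstcli_volumes : Prop := ∀ (rows : List (List String)), Dom_parse_rstcli_volumes rows → Pre_parse_rstcli_volumes rows → Spec_parse_rstcli_volumes rows (parse_rstcli_volumes rows)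

-- ===== LEMMAS AND PROOFS =====

-- modifying the just-inserted key is inserting the modified value (the aliasing identity)
theorem pvModify_insert_self (d : PySem.Dict String (PySem.Dict String String))
    (k : String) (v : PySem.Dict String String) (dflt : PySem.Dict String String)
    (f : PySem.Dict String String → PySem.Dict String String) :
    (d.insert k v).modify k dflt f = d.insert k (f v) := by
  simp [PySem.Dict.modify, PySem.Dict.getD_insert_self, PySem.Dict.insert_insert_self]

-- rows before the first "Name" row leave A's state unchanged
theorem pvFoldA_dropPre (rows : List (List String))
    (vols : PySem.Dict String (PySem.Dict String String)) :
    rows.foldl pvStepA (vols, none) = (pvDropPre rows).foldl pvStepA (vols, none) := by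
  induction rows with
  | nil => rfl
  | cons r rest ih =>
    by_cases h : PySem.List.pyGetD r 0 "" = "Name"
    · simp [pvDropPre, h]
    · simpa [pvDropPre, h, List.foldl_cons, pvStepA] using ih

-- within a segment body, A's loop accumulates insertions into the current volume's entry
theorem pvFoldA_body (body : List (List String))
    (hb : ∀ r ∈ body, ¬ (PySem.List.pyGetD r 0 "" = "Name"))
    (vols : PySem.Dict String (PySem.Dict String String)) (name : String)
    (cur : PySem.Dict String String) :
    body.foldl pvStepA (vols.insert name cur, some name)
      = (vols.insert name
          (body.foldl (fun d r =>
            d.insert (PySem.List.pyGetD r 0 "") (PySem.Str.strip (PySem.List.pyGetD r 1 ""))) cur),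
         some name) := by
  induction body generalizing cur with
  | nil => rfl
  | cons r rest ih =>
    have hr : ¬ (PySem.List.pyGetD r 0 "" = "Name") := hb r (by simp)
    have hrest : ∀ x ∈ rest, ¬ (PySem.List.pyGetD x 0 "" = "Name") :=
      fun x hx => hb x (by simp [hx])
    simp only [List.foldl_cons, pvStepA, hr, pvModify_insert_self]
    exact ih hrest _

-- pvBodySpan really splits: rows = body ++ rest, body all non-"Name", rest empty or "Name"-headed
theorem pvBodySpan_spec (rows : List (List String)) :
    rows = (pvBodySpan rows).1 ++ (pvBodySpan rows).2
      ∧ (∀ r ∈ (pvBodySpan rows).1, ¬ (PySem.List.pyGetD r 0 "" = "Name"))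
      ∧ ((pvBodySpan rows).2 = [] ∨
          ∃ r rest, (pvBodySpan rows).2 = r :: rest ∧ PySem.List.pyGetD r 0 "" = "Name") := by
  induction rows with
  | nil => simp [pvBodySpan]
  | cons r rest ih =>
    by_cases h : PySem.List.pyGetD r 0 "" = "Name"
    · refine ⟨by simp [pvBodySpan, h], by simp [pvBodySpan, h], Or.inr ⟨r, rest, by simp [pvBodySpan, h], h⟩⟩
    · obtain ⟨h1, h2, h3⟩ := ih
      refine ⟨?_, ?_, ?_⟩
      · simpa [pvBodySpan, h] using h1
      · intro x hx
        simp only [pvBodySpan, if_neg h] at hx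
        rcases List.mem_cons.mp hx with rfl | hx'
        · exact h
        · exact h2 x hx'
      · simpa [pvBodySpan, h] using h3

-- main correspondence: from a "Name"-headed (or empty) row list, A's fold computes B's segment fold
theorem pvFoldA_segs (rows : List (List String))
    (hrows : rows = [] ∨ ∃ r rest, rows = r :: rest ∧ PySem.List.pyGetD r 0 "" = "Name")
    (vols : PySem.Dict String (PySem.Dict String String)) (cur : Option String) :
    (rows.foldl pvStepA (vols, cur)).1
      = (pvSegs rows).foldl (fun vs s => vs.insert s.1 (pvAttrDict s.2)) vols := by
  induction rows using pvSegs.induct generalizing vols cur with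
  | case1 => rcases hrows with h | ⟨r, rest, h, _⟩ <;> simp_all [pvSegs]
  | case2 r rest p ih =>
    rcases hrows with h | ⟨r', rest', h, hname⟩
    · simp at h
    · injection h with e1 e2
      subst e1; subst e2
      obtain ⟨hsplit, hbody, hrest⟩ := pvBodySpan_spec rest
      simp only [List.foldl_cons, pvStepA, if_pos hname]
      conv_lhs => rw [hsplit]
      rw [List.foldl_append, pvFoldA_body (pvBodySpan rest).1 hbody, ih hrest]
      simp only [pvSegs, List.foldl_cons, pvAttrDict]
      rfl

-- the result of pvDropPre is empty or "Name"-headed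
theorem pvDropPre_spec (rows : List (List String)) :
    pvDropPre rows = [] ∨
      ∃ r rest, pvDropPre rows = r :: rest ∧ PySem.List.pyGetD r 0 "" = "Name" := by
  induction rows with
  | nil => simp [pvDropPre]
  | cons r rest ih =>
    by_cases h : PySem.List.pyGetD r 0 "" = "Name"
    · exact Or.inr ⟨r, rest, by simp [pvDropPre, h], h⟩
    · simpa [pvDropPre, h] using ih

-- ===== VERDICT (by name: the statement is the Claim_ definition above) =====
theorem parse_rstcli_volumes_spec : Claim_equal_parse_rstcli_volumes := by
  intro rows _ _
  unfold Spec_parse_rstcli_volumes parse_rstcli_volumes parse_rstcli_volumes_alt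
  rw [pvFoldA_dropPre, pvFoldA_segs (pvDropPre rows) (pvDropPre_spec rows)]
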